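-- pv_equiv track=rewrite | github.com/Chan-3/Crowd-Management-System-Dynamic-ACO | utils.py | distribute_evenly
-- ===== SOURCE A (Python) =====
-- def distribute_evenly(count, grid_size, cell_type='exit'):
--     positions = []
--     if count <= 0:
--         return positions
--     edges = []
--     edges.extend([(x, 0) for x in range(grid_size)])
--     edges.extend([(x, grid_size-1) for x in range(grid_size)])
--     edges.extend([(0, y) for y in range(1, grid_size-1)])
--     edges.extend([(grid_size-1, y) for y in range(1, grid_size-1)])
--     if count >= len(edges):
--         return edges[:count]
--     step = len(edges) // count
--     for i in range(count):
--         idx = i * step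
--         positions.append(edges[idx])
--     return positions
-- ===== SOURCE B (Python) =====
-- def distribute_evenly(count, grid_size, cell_type='exit'):
--     # O(count): compute each boundary cell directly from its index instead of
--     # materialising the whole edge list.
--     if count <= 0:
--         return []
--     g = grid_size
--     n = 4 * g - 4 if g >= 2 else (2 if g == 1 else 0)
--
--     def edge(i):
--         if i < g:
--             return (i, 0)
--         if i < 2 * g:
--             return (i - g, g - 1)
--         if i < 3 * g - 2:
--             return (0, i - 2 * g + 1)
--         return (g - 1, i - 3 * g + 3)
--
--     if count >= n:
--         return [edge(i) for i in range(n)]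
--     step = n // count
--     return [edge(i * step) for i in range(count)]
-- ===== Notes on version B (the rewrite author's own statement) =====
-- stated objective: faster
-- what changed: B computes each boundary cell directly from its index by a closed-form boundary mapping instead of building the full edge list of the grid, so the sampling branch is O(count) instead of O(grid_size).
import Mathlib
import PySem

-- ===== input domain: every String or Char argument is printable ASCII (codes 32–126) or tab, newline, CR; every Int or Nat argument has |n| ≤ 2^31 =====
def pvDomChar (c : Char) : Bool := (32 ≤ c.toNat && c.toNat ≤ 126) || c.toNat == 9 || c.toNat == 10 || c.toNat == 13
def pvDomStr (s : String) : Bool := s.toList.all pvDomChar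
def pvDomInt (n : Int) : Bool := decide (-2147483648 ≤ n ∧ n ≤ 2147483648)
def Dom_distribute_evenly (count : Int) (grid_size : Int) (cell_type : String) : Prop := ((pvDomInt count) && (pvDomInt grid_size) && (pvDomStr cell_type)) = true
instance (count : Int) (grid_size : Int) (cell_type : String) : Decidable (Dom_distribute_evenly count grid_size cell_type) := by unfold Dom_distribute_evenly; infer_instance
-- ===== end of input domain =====

-- B computes each boundary cell directly from its index via a closed-form mapping instead of
-- materialising A's full edge list, making the sampling branch O(count) (objective: faster).


-- ===== PORT A =====
-- Literal transliteration of A: build the four boundary strips, then either slice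
-- edges[:count] or sample edges[i*step].  edges[idx] is ported as pyGet? … |>.getD (0,0);
-- the index is always in range there, so the default is never used and A raises nowhere.
def distribute_evenly (count : Int) (grid_size : Int) (cell_type : String) : List (Int × Int) :=
  if count ≤ 0 then []
  else
    let edges : List (Int × Int) :=
      ((PySem.List.pyRange 0 grid_size 1).map (fun x => (x, (0 : Int))))
      ++ ((PySem.List.pyRange 0 grid_size 1).map (fun x => (x, grid_size - 1)))
      ++ ((PySem.List.pyRange 1 (grid_size - 1) 1).map (fun y => ((0 : Int), y)))
      ++ ((PySem.List.pyRange 1 (grid_size - 1) 1).map (fun y => (grid_size - 1, y)))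
    if count ≥ (edges.length : Int) then
      PySem.List.slice edges none (some count)
    else
      let step := PySem.Int.floordiv (edges.length : Int) count
      (PySem.List.pyRange 0 count 1).map
        (fun i => (PySem.List.pyGet? edges (i * step)).getD ((0 : Int), (0 : Int)))

-- ===== PORT B =====
-- closed-form mapping from a boundary index to its cell (B's helper `edge`)
def pvEdge (g : Int) (i : Int) : Int × Int :=
  if i < g then (i, 0)
  else if i < 2 * g then (i - g, g - 1)
  else if i < 3 * g - 2 then (0, i - 2 * g + 1)
  else (g - 1, i - 3 * g + 3)

def distribute_evenly_alt (count : Int) (grid_size : Int) (cell_type : String) : List (Int × Int) :=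
  if count ≤ 0 then []
  else
    let g := grid_size
    let n : Int := if g ≥ 2 then 4 * g - 4 else if g = 1 then 2 else 0
    if count ≥ n then
      (PySem.List.pyRange 0 n 1).map (pvEdge g)
    else
      let step := PySem.Int.floordiv n count
      (PySem.List.pyRange 0 count 1).map (fun i => pvEdge g (i * step))

-- ===== PRECONDITION & SPEC =====
def Spec_distribute_evenly (count : Int) (grid_size : Int) (cell_type : String) (out : List (Int × Int)) : Prop := out = distribute_evenly_alt count grid_size cell_type
instance (count : Int) (grid_size : Int) (cell_type : String) (out : List (Int × Int)) : Decidable (Spec_distribute_evenly count grid_size cell_type out) := by unfold Spec_distribute_evenly; infer_instance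

-- ===== CLAIM (what is proved, stated in full; the proofs are below) =====
def Claim_equal_distribute_evenly : Prop := ∀ (count : Int) (grid_size : Int) (cell_type : String), Dom_distribute_evenly count grid_size cell_type → Spec_distribute_evenly count grid_size cell_type (distribute_evenly count grid_size cell_type)

-- ===== LEMMAS AND PROOFS =====

-- A's edge list and B's boundary length, named for the proofs
def pvEdges (g : Int) : List (Int × Int) :=
  ((PySem.List.pyRange 0 g 1).map (fun x => (x, (0 : Int))))
  ++ ((PySem.List.pyRange 0 g 1).map (fun x => (x, g - 1)))
  ++ ((PySem.List.pyRange 1 (g - 1) 1).map (fun y => ((0 : Int), y)))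
  ++ ((PySem.List.pyRange 1 (g - 1) 1).map (fun y => (g - 1, y)))

def pvN (g : Int) : Int := if g ≥ 2 then 4 * g - 4 else if g = 1 then 2 else 0

lemma pvN_nonneg (g : Int) : 0 ≤ pvN g := by unfold pvN; split_ifs <;> omega

lemma pvRangeSplit4 (a b c d : Nat) :
    List.range (a + b + c + d) =
      List.range a ++ (List.range b).map (a + ·) ++ (List.range c).map (a + b + ·)
        ++ (List.range d).map (a + b + c + ·) := by
  rw [List.range_add, List.range_add, List.range_add]

-- A's edge list is exactly B's closed-form mapping applied to each boundary index.
lemma pvEdges_eq (g : Int) :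
    pvEdges g = (PySem.List.pyRange 0 (pvN g) 1).map (pvEdge g) := by
  unfold pvEdges pvN
  rcases lt_trichotomy g 1 with hg | rfl | hg
  · rw [if_neg (by omega), if_neg (by omega)]
    simp [PySem.List.pyRange_one, show (g - 1 - 1).toNat = 0 by omega, show g ≤ 0 by omega]
  · decide
  · rw [if_pos (by omega)]
    obtain ⟨G, rfl⟩ : ∃ G : Nat, g = (G : Int) + 2 := ⟨(g - 2).toNat, by omega⟩
    simp only [PySem.List.pyRange_one]
    rw [show ((G : Int) + 2 - 0).toNat = G + 2 by omega,
        show ((G : Int) + 2 - 1 - 1).toNat = G by omega,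
        show (4 * ((G : Int) + 2) - 4 - 0).toNat = G + 2 + (G + 2) + G + G by omega,
        pvRangeSplit4]
    simp only [List.map_append, List.map_map]
    refine congrArg₂ (· ++ ·) (congrArg₂ (· ++ ·) (congrArg₂ (· ++ ·) ?_ ?_) ?_) ?_ <;>
      (apply List.map_congr_left; intro k hk; rw [List.mem_range] at hk;
       simp only [Function.comp, pvEdge];
       split_ifs <;> (rw [Prod.mk.injEq]; constructor <;> omega))

-- the two ports, re-stated through the named helpers (definitional)
lemma pvA_unfold (c g : Int) (t : String) :
    distribute_evenly c g t =
      if c ≤ 0 then []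
      else if c ≥ ((pvEdges g).length : Int) then PySem.List.slice (pvEdges g) none (some c)
      else (PySem.List.pyRange 0 c 1).map
        (fun i => (PySem.List.pyGet? (pvEdges g)
            (i * PySem.Int.floordiv ((pvEdges g).length : Int) c)).getD ((0:Int),(0:Int))) := rfl

lemma pvB_unfold (c g : Int) (t : String) :
    distribute_evenly_alt c g t =
      if c ≤ 0 then []
      else if c ≥ pvN g then (PySem.List.pyRange 0 (pvN g) 1).map (pvEdge g)
      else (PySem.List.pyRange 0 c 1).map
        (fun i => pvEdge g (i * PySem.Int.floordiv (pvN g) c)) := rfl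

lemma pvMain (count grid_size : Int) (cell_type : String) :
    distribute_evenly count grid_size cell_type = distribute_evenly_alt count grid_size cell_type := by
  rw [pvA_unfold, pvB_unfold]
  by_cases hc : count ≤ 0
  · simp [hc]
  rw [if_neg hc, if_neg hc]
  have hn0 := pvN_nonneg grid_size
  have hlen : ((pvEdges grid_size).length : Int) = pvN grid_size := by
    rw [pvEdges_eq, List.length_map, PySem.List.length_pyRange_one]; omega
  rw [hlen]
  by_cases hcn : count ≥ pvN grid_size
  · rw [if_pos hcn, if_pos hcn, pvEdges_eq, PySem.List.slice_to _ (by omega)]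
    apply List.take_of_length_le
    rw [List.length_map, PySem.List.length_pyRange_one]
    omega
  · rw [if_neg hcn, if_neg hcn]
    apply List.map_congr_left
    intro i hi
    rw [PySem.List.mem_pyRange_one] at hi
    set n := pvN grid_size with hn
    set step := PySem.Int.floordiv n count with hs
    have hstep : step = n / count := PySem.Int.floordiv_eq_ediv_of_pos (by omega)
    have h1 : 1 ≤ step := by
      rw [hstep, Int.le_ediv_iff_mul_le (by omega)]
      omega
    have h2 : n / count * count ≤ n := Int.ediv_mul_le n (by omega)
    have hub : i * step < n := by
      have : i * step ≤ (count - 1) * step :=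
        mul_le_mul_of_nonneg_right (by omega) (by omega)
      nlinarith [h2, hstep]
    have hlb : 0 ≤ i * step := mul_nonneg (by omega) (by omega)
    rw [pvEdges_eq, PySem.List.pyGet?_of_nonneg _ hlb, List.getElem?_map,
        List.getElem?_eq_getElem (by rw [PySem.List.length_pyRange_one]; omega)]
    simp only [Option.map_some, Option.getD_some]
    rw [PySem.List.getElem_pyRange_one]
    congr 1
    omega

-- ===== VERDICT (by name: the statement is the Claim_ definition above) =====
theorem distribute_evenly_spec : Claim_equal_distribute_evenly := by
  intro count grid_size cell_type _
  unfold Spec_distribute_evenly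
  exact pvMain count grid_size cell_type
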